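-- pv_equiv track=rewrite | github.com/Guillaume-Delbarre/AdventOfCode | jour 12/main.py | partial_compte
-- ===== SOURCE A (Python) =====
-- def partial_compte(input) :
--     hash_en_cours = False
--     n = 0
--     ret = ''
--     for lettre in input :
--         if lettre == '#' :
--             hash_en_cours = True
--             n += 1
--         elif lettre == '.' :
--             if hash_en_cours :
--                 ret += str(n) + ','
--                 n = 0
--                 hash_en_cours = False
--         elif lettre == '?' :
--             if len(ret) > 1 :
--                 return ret[:-1]
--             else :
--                 return ret
--     if len(ret) > 1 :
--         return ret[:-1]
--     else :
--         return ret
-- ===== SOURCE B (Python) =====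
-- def partial_compte(input):
--     segments = input.split('?')[0].split('.')
--     parts = [str(seg.count('#')) for seg in segments[:-1] if seg.count('#') > 0]
--     return ','.join(parts)
-- ===== Notes on version B (the rewrite author's own statement) =====
-- stated objective: simpler
-- what changed: A's character-by-character state machine (hash flag, running counter, string accumulator with trailing-comma trimming) is replaced by string decomposition: cut at the first '?' with split, split that prefix on '.', count '#' in every segment except the unfinished last one, and join the non-zero counts with ','.
import Mathlib
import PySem

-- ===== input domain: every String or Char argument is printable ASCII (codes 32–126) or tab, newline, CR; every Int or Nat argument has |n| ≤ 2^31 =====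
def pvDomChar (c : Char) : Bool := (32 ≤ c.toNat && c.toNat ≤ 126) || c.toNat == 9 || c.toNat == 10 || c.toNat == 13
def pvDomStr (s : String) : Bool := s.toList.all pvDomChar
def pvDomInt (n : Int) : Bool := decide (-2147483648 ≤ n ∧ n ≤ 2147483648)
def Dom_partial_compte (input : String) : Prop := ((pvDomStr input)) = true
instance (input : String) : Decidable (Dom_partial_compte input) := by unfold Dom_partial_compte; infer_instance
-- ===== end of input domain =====

-- B replaces A's character state machine by split('?')/split('.')/count('#')/join — simpler decomposition, same cost.


-- ===== PORT A =====
-- 'if len(ret) > 1: return ret[:-1] else: return ret' (the shared exit code of A)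
def pcFinal (ret : List Char) : List Char :=
  if 1 < PySem.Chars.len ret then PySem.List.slice ret none (some (-1)) else ret

-- the 'for lettre in input' loop with its three pieces of state; early return at '?'
def pcLoop : List Char → Bool → Int → List Char → List Char
  | [], _, _, ret => pcFinal ret
  | lettre :: rest, hash_en_cours, n, ret =>
    if lettre = '#' then pcLoop rest true (n + 1) ret
    else if lettre = '.' then
      if hash_en_cours then pcLoop rest false 0 (ret ++ PySem.Int.toChars n ++ [','])
      else pcLoop rest hash_en_cours n ret
    else if lettre = '?' then pcFinal ret
    else pcLoop rest hash_en_cours n ret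

def partial_compte (input : String) : String :=
  String.ofList (pcLoop input.toList false 0 [])

-- ===== PORT B =====
-- input.split('?')[0].split('.')  — str.split never returns an empty list, so [0] is its head
def partial_compte_alt (input : String) : String :=
  let segments :=
    PySem.Chars.splitOn ((PySem.Chars.splitOn input.toList ['?']).headD []) ['.']
  let parts :=
    ((PySem.List.slice segments none (some (-1))).filter
        (fun seg => decide (0 < PySem.Chars.count seg ['#']))).map
      (fun seg => PySem.Int.toChars ((PySem.Chars.count seg ['#'] : Int)))
  String.ofList (PySem.Chars.join [','] parts)

-- ===== PRECONDITION & SPEC =====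
def Spec_partial_compte (input : String) (out : String) : Prop := out = partial_compte_alt input
instance (input : String) (out : String) : Decidable (Spec_partial_compte input out) := by unfold Spec_partial_compte; infer_instance

-- ===== CLAIM (what is proved, stated in full; the proofs are below) =====
def Claim_equal_partial_compte : Prop := ∀ (input : String), Dom_partial_compte input → Spec_partial_compte input (partial_compte input)

-- ===== LEMMAS AND PROOFS =====

-- structural single-character split (the shape splitOn has for a one-char separator)
def mySplit (d : Char) : List Char → List (List Char)
  | [] => [[]]
  | c :: r =>
    if c = d then [] :: mySplit d r
    else (c :: (mySplit d r).headD []) :: (mySplit d r).tail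

lemma mySplit_ne_nil (d : Char) (l : List Char) : mySplit d l ≠ [] := by
  cases l with
  | nil => simp [mySplit]
  | cons c r => by_cases h : c = d <;> simp [mySplit, h]

lemma headD_cons_tail {α : Type} (l : List α) (d : α) (h : l ≠ []) :
    l.headD d :: l.tail = l := by
  cases l with
  | nil => exact absurd rfl h
  | cons x xs => rfl

lemma head?_getD_cons_tail {α : Type} (l : List α) (d : α) (h : l ≠ []) :
    l.head?.getD d :: l.tail = l := by
  cases l with
  | nil => exact absurd rfl h
  | cons x xs => rfl

lemma splitOn_go_single (d : Char) :
    ∀ (fuel : Nat) (l cur : List Char) (acc : List (List Char)), l.length < fuel →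
      PySem.Chars.splitOn.go [d] fuel l cur acc =
        acc.reverse ++ ((cur.reverse ++ (mySplit d l).headD []) :: (mySplit d l).tail) := by
  intro fuel
  induction fuel with
  | zero => intro l cur acc h; omega
  | succ f ih =>
    intro l cur acc h
    cases l with
    | nil => simp [PySem.Chars.splitOn.go, mySplit]
    | cons c rest =>
      by_cases hc : c = d
      · subst hc
        have hpre : List.isPrefixOf [c] (c :: rest) = true := by
          simp [List.isPrefixOf]
        rw [PySem.Chars.splitOn.go]
        simp only [hpre, if_true]
        have hr : rest.length < f := by simpa using h
        rw [show List.drop (List.length [c]) (c :: rest) = rest by simp]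
        rw [ih rest [] (cur.reverse :: acc) hr]
        simp [mySplit, head?_getD_cons_tail _ _ (mySplit_ne_nil c rest)]
      · have hpre : List.isPrefixOf [d] (c :: rest) = false := by
          simp [List.isPrefixOf]
          exact fun hh => absurd hh.symm hc
        rw [PySem.Chars.splitOn.go]
        simp only [hpre]
        have hr : rest.length < f := by simpa using h
        rw [if_neg (by simp)]
        rw [ih rest (c :: cur) acc hr]
        simp [mySplit, hc]

lemma splitOn_single (s : List Char) (d : Char) :
    PySem.Chars.splitOn s [d] = mySplit d s := by
  rw [PySem.Chars.splitOn, splitOn_go_single d (s.length + 1) s [] [] (by omega)]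
  simp [head?_getD_cons_tail _ _ (mySplit_ne_nil d s)]

lemma count_go_single (c : Char) :
    ∀ (fuel : Nat) (l : List Char) (acc : Nat), l.length ≤ fuel →
      PySem.Chars.count.go [c] fuel l acc = acc + l.count c := by
  intro fuel
  induction fuel with
  | zero =>
    intro l acc h
    have : l = [] := List.eq_nil_of_length_eq_zero (by omega)
    subst this; simp [PySem.Chars.count.go]
  | succ f ih =>
    intro l acc h
    cases l with
    | nil => simp [PySem.Chars.count.go]
    | cons a rest =>
      by_cases hc : a = c
      · subst hc
        have hpre : List.isPrefixOf [a] (a :: rest) = true := by simp [List.isPrefixOf]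
        rw [PySem.Chars.count.go]
        simp only [hpre, if_true]
        rw [show List.drop (List.length [a]) (a :: rest) = rest by simp]
        rw [ih rest (acc + 1) (by simpa using h)]
        simp [List.count_cons_self]
        omega
      · have hpre : List.isPrefixOf [c] (a :: rest) = false := by
          simp [List.isPrefixOf]
          exact fun hh => absurd hh.symm hc
        rw [PySem.Chars.count.go]
        simp only [hpre]
        rw [if_neg (by simp)]
        rw [ih rest acc (by simpa using h)]
        simp [List.count_cons_of_ne hc]

lemma count_single (s : List Char) (c : Char) :
    PySem.Chars.count s [c] = s.count c := by
  have h := count_go_single c s.length s 0 (le_refl _)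
  rw [PySem.Chars.count]
  simp only [List.isEmpty_cons, Bool.false_eq_true, if_false]
  omega

-- the list of emitted group counts, reading the '.'-segments with a pending count n for the first
def sel : List (List Char) → Int → List (List Char)
  | [], _ => []
  | [_], _ => []
  | s :: rest@(_ :: _), n =>
    (if 0 < n + (s.count '#' : Int) then [PySem.Int.toChars (n + (s.count '#' : Int))] else [])
      ++ sel rest 0

-- ret's shape: each emitted count followed by ','
def blocks : List (List Char) → List Char
  | [] => []
  | x :: xs => x ++ [','] ++ blocks xs

lemma sel_hash (h : List Char) (t : List (List Char)) (n : Int) :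
    sel (('#' :: h) :: t) n = sel (h :: t) (n + 1) := by
  cases t with
  | nil => simp [sel]
  | cons b bs =>
    have harg : n + (((('#' :: h).count '#' : Nat)) : Int) = n + 1 + ((h.count '#' : Nat) : Int) := by
      rw [List.count_cons_self]
      push_cast; ring
    simp only [sel, harg]

lemma sel_other (c : Char) (hc : c ≠ '#') (h : List Char) (t : List (List Char)) (n : Int) :
    sel ((c :: h) :: t) n = sel (h :: t) n := by
  cases t with
  | nil => simp [sel]
  | cons b bs =>
    have harg : ((c :: h).count '#' : Nat) = (h.count '#' : Nat) := by
      exact List.count_cons_of_ne hc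
    simp only [sel, harg]

-- the main loop invariant: A's loop = final cleanup of accumulated blocks of sel
lemma loop_eq :
    ∀ (cs : List Char) (n : Int) (ret : List Char), 0 ≤ n →
      pcLoop cs (decide (0 < n)) n ret =
        pcFinal (ret ++ blocks (sel (mySplit '.' ((mySplit '?' cs).headD [])) n)) := by
  intro cs
  induction cs with
  | nil => intro n ret _; simp [pcLoop, mySplit, sel, blocks]
  | cons c rest ih =>
    intro n ret hn
    by_cases hq : c = '?'
    · subst hq
      simp [pcLoop, mySplit, sel, blocks]
    · by_cases hh : c = '#'
      · subst hh
        have e1 : (mySplit '?' ('#' :: rest)).headD [] = '#' :: (mySplit '?' rest).headD [] := by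
          simp [mySplit]
        have e2 : mySplit '.' ('#' :: (mySplit '?' rest).headD []) =
            ('#' :: (mySplit '.' ((mySplit '?' rest).headD [])).headD []) ::
              (mySplit '.' ((mySplit '?' rest).headD [])).tail := by
          simp [mySplit]
        rw [show pcLoop ('#' :: rest) (decide (0 < n)) n ret = pcLoop rest true (n + 1) ret by
          simp [pcLoop]]
        rw [show (true : Bool) = decide (0 < n + 1) by simp; omega]
        rw [ih (n + 1) ret (by omega)]
        conv_rhs => rw [e1, e2, sel_hash]
        rw [headD_cons_tail _ _ (mySplit_ne_nil '.' ((mySplit '?' rest).headD []))]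
      · by_cases hd : c = '.'
        · subst hd
          have e1 : (mySplit '?' ('.' :: rest)).headD [] = '.' :: (mySplit '?' rest).headD [] := by
            simp [mySplit]
          have e2 : mySplit '.' ('.' :: (mySplit '?' rest).headD []) =
              [] :: mySplit '.' ((mySplit '?' rest).headD []) := by
            simp [mySplit]
          have ecg : mySplit '.' ((mySplit '?' rest).headD []) =
              (mySplit '.' ((mySplit '?' rest).headD [])).headD [] ::
                (mySplit '.' ((mySplit '?' rest).headD [])).tail :=
            (headD_cons_tail _ _ (mySplit_ne_nil '.' _)).symm
          rw [show pcLoop ('.' :: rest) (decide (0 < n)) n ret =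
                if decide (0 < n) then pcLoop rest false 0 (ret ++ PySem.Int.toChars n ++ [','])
                else pcLoop rest (decide (0 < n)) n ret by simp [pcLoop]]
          by_cases hpos : 0 < n
          · rw [if_pos (by simpa using hpos)]
            rw [show (false : Bool) = decide (0 < (0:Int)) by simp]
            rw [ih 0 _ (by omega)]
            conv_rhs => rw [e1, e2, ecg]
            have hsel : sel ([] :: (mySplit '.' ((mySplit '?' rest).headD [])).headD [] ::
                (mySplit '.' ((mySplit '?' rest).headD [])).tail) n =
                PySem.Int.toChars n :: sel ((mySplit '.' ((mySplit '?' rest).headD [])).headD [] ::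
                  (mySplit '.' ((mySplit '?' rest).headD [])).tail) 0 := by
              simp only [sel, List.count_nil, Nat.cast_zero, add_zero]
              rw [if_pos hpos]
              simp
            rw [hsel, ← ecg]
            simp [blocks]
          · have hn0 : n = 0 := by omega
            subst hn0
            rw [if_neg (by simp)]
            rw [ih 0 ret (by omega)]
            conv_rhs => rw [e1, e2, ecg]
            have hsel : sel ([] :: (mySplit '.' ((mySplit '?' rest).headD [])).headD [] ::
                (mySplit '.' ((mySplit '?' rest).headD [])).tail) 0 =
                sel ((mySplit '.' ((mySplit '?' rest).headD [])).headD [] ::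
                  (mySplit '.' ((mySplit '?' rest).headD [])).tail) 0 := by
              simp only [sel, List.count_nil, Nat.cast_zero, add_zero]
              rw [if_neg (lt_irrefl (0 : Int))]
              simp
            rw [hsel, ← ecg]
        · -- ordinary character
          have e1 : (mySplit '?' (c :: rest)).headD [] = c :: (mySplit '?' rest).headD [] := by
            simp [mySplit, hq]
          have e2 : mySplit '.' (c :: (mySplit '?' rest).headD []) =
              (c :: (mySplit '.' ((mySplit '?' rest).headD [])).headD []) ::
                (mySplit '.' ((mySplit '?' rest).headD [])).tail := by
            simp [mySplit, hd]
          rw [show pcLoop (c :: rest) (decide (0 < n)) n ret =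
                pcLoop rest (decide (0 < n)) n ret by simp [pcLoop, hh, hd, hq]]
          rw [ih n ret hn]
          conv_rhs => rw [e1, e2, sel_other c hh]
          rw [headD_cons_tail _ _ (mySplit_ne_nil '.' ((mySplit '?' rest).headD []))]

lemma toChars_ne_nil (n : Int) : PySem.Int.toChars n ≠ [] := by
  unfold PySem.Int.toChars
  split
  · simp
  · intro hcon
    have hpos := @Nat.length_toDigits_pos 10 n.toNat
    rw [hcon] at hpos
    simp at hpos

-- sel at pending 0 is exactly B's dropLast/filter/map pipeline
lemma sel_zero (segs : List (List Char)) :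
    sel segs 0 =
      ((segs.dropLast).filter (fun seg => decide (0 < PySem.Chars.count seg ['#']))).map
        (fun seg => PySem.Int.toChars ((PySem.Chars.count seg ['#'] : Int))) := by
  induction segs with
  | nil => simp [sel]
  | cons a t ih =>
    cases t with
    | nil => simp [sel]
    | cons b bs =>
      simp only [sel]
      rw [ih]
      rw [show (a :: b :: bs).dropLast = a :: (b :: bs).dropLast from
            List.dropLast_cons_of_ne_nil (by simp)]
      rw [List.filter_cons]
      by_cases hp : 0 < a.count '#'
      · rw [if_pos (show (0:Int) < 0 + ((a.count '#' : Nat) : Int) by omega)]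
        rw [if_pos (show decide (0 < PySem.Chars.count a ['#']) = true by
              simp only [count_single, decide_eq_true_eq]; omega)]
        simp [count_single]
      · rw [if_neg (show ¬ ((0:Int) < 0 + ((a.count '#' : Nat) : Int)) by omega)]
        rw [if_neg (show ¬ (decide (0 < PySem.Chars.count a ['#']) = true) by
              simp only [count_single, decide_eq_true_eq]; omega)]
        simp

lemma blocks_eq_join (x : List Char) (xs : List (List Char)) :
    blocks (x :: xs) = PySem.Chars.join [','] (x :: xs) ++ [','] := by
  induction xs generalizing x with
  | nil => simp [blocks, PySem.Chars.join_singleton]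
  | cons y ys ih =>
    rw [PySem.Chars.join_cons_cons]
    rw [show blocks (x :: y :: ys) = x ++ [','] ++ blocks (y :: ys) from rfl]
    rw [ih y]
    simp

lemma pcFinal_blocks (xs : List (List Char)) (hne : ∀ x ∈ xs, x ≠ []) :
    pcFinal (blocks xs) = PySem.Chars.join [','] xs := by
  cases xs with
  | nil => simp [blocks, pcFinal, PySem.Chars.join_nil]
  | cons x t =>
    rw [blocks_eq_join]
    have hx : x ≠ [] := hne x (by simp)
    have hlen : 1 ≤ (PySem.Chars.join [','] (x :: t)).length := by
      cases t with
      | nil =>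
        rw [PySem.Chars.join_singleton]
        cases x with
        | nil => exact absurd rfl hx
        | cons _ _ => simp
      | cons y ys =>
        rw [PySem.Chars.join_cons_cons]
        cases x with
        | nil => exact absurd rfl hx
        | cons _ _ => simp
    rw [pcFinal]
    rw [if_pos (by simp; omega)]
    rw [PySem.List.slice_to_neg_one]
    exact List.dropLast_concat ..

-- ===== VERDICT (by name: the statement is the Claim_ definition above) =====
theorem partial_compte_spec : Claim_equal_partial_compte := by
  intro input _
  unfold Spec_partial_compte partial_compte partial_compte_alt
  simp only [splitOn_single, PySem.List.slice_to_neg_one]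
  rw [show (false : Bool) = decide (0 < (0:Int)) by simp]
  rw [loop_eq input.toList 0 [] (by omega)]
  rw [List.nil_append]
  rw [sel_zero]
  rw [pcFinal_blocks]
  intro x hx
  simp only [List.mem_map] at hx
  obtain ⟨seg, _, rfl⟩ := hx
  exact toChars_ne_nil _
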